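-- pv_equiv track=rewrite | github.com/6210qwe/leetcode_py | leetcode_solutions/by_id/q3821.py | count_overlap_cells
-- ===== SOURCE A (Python) =====
-- from typing import List
--
-- def compute_rolling_hash(s: str, base: int, mod: int) -> List[int]:
--     hash_values = [0] * (len(s) + 1)
--     power = 1
--     for i in range(len(s)):
--         hash_values[i + 1] = (hash_values[i] + (ord(s[i]) - ord('a') + 1) * power) % mod
--         power = (power * base) % mod
--     return hash_values
--
-- def find_substring_starts(text: str, pattern: str, base: int, mod: int) -> List[int]:
--     text_hash = compute_rolling_hash(text, base, mod)
--     pattern_hash = compute_rolling_hash(pattern, base, mod)[-1]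
--
--     starts = []
--     pattern_len = len(pattern)
--     for i in range(len(text) - pattern_len + 1):
--         if (text_hash[i + pattern_len] - text_hash[i] + mod) % mod == pattern_hash:
--             starts.append(i)
--     return starts
--
-- def count_overlap_cells(grid: List[List[str]], pattern: str) -> int:
--     m, n = len(grid), len(grid[0])
--     base, mod = 257, 10**9 + 7
--
--     # 将每行和每列转换为字符串
--     rows = [''.join(row) for row in grid]
--     cols = [''.join(grid[i][j] for i in range(m)) for j in range(n)]
--
--     # 查找水平和垂直匹配的起始位置
--     row_matches = [find_substring_starts(row, pattern, base, mod) for row in rows]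
--     col_matches = [find_substring_starts(col, pattern, base, mod) for col in cols]
--
--     # 记录每个单元格是否在水平和垂直匹配中
--     horizontal_matches = set()
--     vertical_matches = set()
--
--     for i, matches in enumerate(row_matches):
--         for start in matches:
--             for j in range(start, start + len(pattern)):
--                 horizontal_matches.add((i, j))
--
--     for j, matches in enumerate(col_matches):
--         for start in matches:
--             for i in range(start, start + len(pattern)):
--                 vertical_matches.add((i, j))
--
--     # 计算重叠单元格的数量
--     overlap_count = len(horizontal_matches & vertical_matches)
--     return overlap_count
-- ===== SOURCE B (Python) =====
-- from typing import List
--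
-- def _match_starts(text: str, pattern: str, base: int, mod: int) -> List[int]:
--     ph = [0]
--     pw = 1
--     for c in text:
--         ph.append((ph[-1] + (ord(c) - 96) * pw) % mod)
--         pw = pw * base % mod
--     ptn = 0
--     pw = 1
--     for c in pattern:
--         ptn = (ptn + (ord(c) - 96) * pw) % mod
--         pw = pw * base % mod
--     L = len(pattern)
--     return [i for i in range(len(text) - L + 1) if (ph[i + L] - ph[i]) % mod == ptn]
--
-- def count_overlap_cells(grid: List[List[str]], pattern: str) -> int:
--     m, n = len(grid), len(grid[0])
--     base, mod = 257, 10**9 + 7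
--     L = len(pattern)
--     rows = [''.join(row) for row in grid]
--     cols = [''.join(r[j] for r in grid) for j in range(n)]
--     row_starts = [_match_starts(r, pattern, base, mod) for r in rows]
--     col_starts = [_match_starts(c, pattern, base, mod) for c in cols]
--     total = 0
--     for i in range(m):
--         for j in range(n):
--             if any(s <= j < s + L for s in row_starts[i]) and \
--                any(s <= i < s + L for s in col_starts[j]):
--                 total += 1
--     return total
-- ===== Notes on version B (the rewrite author's own statement) =====
-- stated objective: alternative
-- what changed: B drops A's per-cell set insertion and set intersection: it counts cells directly over the m*n rectangle, testing each cell against the per-row/per-column hash-match start lists, with the prefix hashes built by a single append loop instead of A's preallocated index-assigned array.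
-- outside the precondition, e.g. on count_overlap_cells([], 'a'): A raises IndexError, B raises IndexError; on count_overlap_cells([['a', 'b'], ['a']], 'a'): A raises IndexError, B raises IndexError
import Mathlib
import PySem

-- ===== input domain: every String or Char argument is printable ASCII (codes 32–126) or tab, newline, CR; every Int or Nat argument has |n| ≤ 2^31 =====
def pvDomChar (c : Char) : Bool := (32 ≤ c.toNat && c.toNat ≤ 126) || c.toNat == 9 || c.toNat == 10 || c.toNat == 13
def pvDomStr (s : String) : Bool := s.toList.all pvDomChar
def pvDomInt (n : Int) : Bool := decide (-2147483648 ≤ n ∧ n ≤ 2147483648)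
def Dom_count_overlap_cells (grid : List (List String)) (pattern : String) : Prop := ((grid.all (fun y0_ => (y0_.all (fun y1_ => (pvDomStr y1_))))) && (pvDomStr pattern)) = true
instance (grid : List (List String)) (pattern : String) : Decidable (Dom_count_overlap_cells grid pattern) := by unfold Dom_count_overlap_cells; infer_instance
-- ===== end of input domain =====

-- B replaces A's per-cell set insertion and set intersection by a direct per-cell count
-- over the m×n rectangle (objective: alternative counting structure; same hash-match rule).

-- ===== PORT A =====
def compute_rolling_hash (s : String) (base md : Int) : List Int :=
  ((PySem.List.pyRange 0 (PySem.Str.len s)).foldl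
    (fun (st : List Int × Int) i =>
      (PySem.List.pySetD st.1 (i + 1)
        (PySem.Int.mod (PySem.List.pyGetD st.1 i 0 +
          (((PySem.List.pyGetD s.toList i ' ').toNat : Int) - 97 + 1) * st.2) md),
       PySem.Int.mod (st.2 * base) md))
    (List.replicate (s.toList.length + 1) (0 : Int), 1)).1

def find_substring_starts (text pattern : String) (base md : Int) : List Int :=
  let textHash := compute_rolling_hash text base md
  let patternHash := PySem.List.pyGetD (compute_rolling_hash pattern base md) (-1) 0
  let patternLen := PySem.Str.len pattern
  (PySem.List.pyRange 0 (PySem.Str.len text - patternLen + 1)).foldl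
    (fun starts i =>
      if PySem.Int.mod (PySem.List.pyGetD textHash (i + patternLen) 0 -
            PySem.List.pyGetD textHash i 0 + md) md == patternHash
      then starts ++ [i] else starts) []

def count_overlap_cells (grid : List (List String)) (pattern : String) : Int :=
  let m : Int := (grid.length : Int)
  let n : Int := ((PySem.List.pyGetD grid 0 []).length : Int)
  let base : Int := 257
  let md : Int := 10 ^ 9 + 7
  let rows := grid.map (fun row => PySem.Str.join "" row)
  let cols := (PySem.List.pyRange 0 n).map (fun j =>
    PySem.Str.join "" ((PySem.List.pyRange 0 m).map (fun i =>
      PySem.List.pyGetD (PySem.List.pyGetD grid i []) j "")))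
  let rowMatches := rows.map (fun row => find_substring_starts row pattern base md)
  let colMatches := cols.map (fun col => find_substring_starts col pattern base md)
  let horizontal : PySem.Set (Int × Int) :=
    (PySem.List.enumerate rowMatches 0).foldl (fun S p =>
      p.2.foldl (fun S start =>
        (PySem.List.pyRange start (start + PySem.Str.len pattern)).foldl
          (fun S j => PySem.Set.add S (p.1, j)) S) S) PySem.Set.empty
  let vertical : PySem.Set (Int × Int) :=
    (PySem.List.enumerate colMatches 0).foldl (fun S p =>
      p.2.foldl (fun S start =>
        (PySem.List.pyRange start (start + PySem.Str.len pattern)).foldl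
          (fun S i => PySem.Set.add S (i, p.1)) S) S) PySem.Set.empty
  PySem.Set.len (PySem.Set.inter horizontal vertical)

-- ===== PORT B =====
def match_starts (text pattern : String) (base md : Int) : List Int :=
  let ph := (text.toList.foldl
    (fun (st : List Int × Int) c =>
      (st.1 ++ [PySem.Int.mod (PySem.List.pyGetD st.1 (-1) 0 + (((c.toNat : Int)) - 96) * st.2) md],
       PySem.Int.mod (st.2 * base) md)) ([0], 1)).1
  let ptn := (pattern.toList.foldl
    (fun (st : Int × Int) c =>
      (PySem.Int.mod (st.1 + (((c.toNat : Int)) - 96) * st.2) md,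
       PySem.Int.mod (st.2 * base) md)) (0, 1)).1
  let L := PySem.Str.len pattern
  (PySem.List.pyRange 0 (PySem.Str.len text - L + 1)).filter
    (fun i => PySem.Int.mod (PySem.List.pyGetD ph (i + L) 0 - PySem.List.pyGetD ph i 0) md == ptn)

def count_overlap_cells_alt (grid : List (List String)) (pattern : String) : Int :=
  let m : Int := (grid.length : Int)
  let n : Int := ((PySem.List.pyGetD grid 0 []).length : Int)
  let base : Int := 257
  let md : Int := 10 ^ 9 + 7
  let L := PySem.Str.len pattern
  let rows := grid.map (fun row => PySem.Str.join "" row)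
  let cols := (PySem.List.pyRange 0 n).map (fun j =>
    PySem.Str.join "" (grid.map (fun r => PySem.List.pyGetD r j "")))
  let rowStarts := rows.map (fun r => match_starts r pattern base md)
  let colStarts := cols.map (fun c => match_starts c pattern base md)
  (PySem.List.pyRange 0 m).foldl (fun total i =>
    (PySem.List.pyRange 0 n).foldl (fun total j =>
      if (PySem.List.pyGetD rowStarts i []).any (fun s => decide (s ≤ j) && decide (j < s + L)) &&
         (PySem.List.pyGetD colStarts j []).any (fun s => decide (s ≤ i) && decide (i < s + L))
      then total + 1 else total) total) 0

-- ===== PRECONDITION & SPEC =====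
-- Pre_ excludes exactly the inputs on which Python A raises IndexError: the empty grid
-- (grid[0]) and ragged grids with a row shorter than the first row (grid[i][j]).
def Pre_count_overlap_cells (grid : List (List String)) (pattern : String) : Prop :=
  grid ≠ [] ∧ ∀ row ∈ grid, (grid.headD []).length ≤ row.length
instance (grid : List (List String)) (pattern : String) : Decidable (Pre_count_overlap_cells grid pattern) := by unfold Pre_count_overlap_cells; infer_instance
def pvWitness_count_overlap_cells : List (List String) × String := ([["a", "b"], ["b", "a"]], "ab")

def Spec_count_overlap_cells (grid : List (List String)) (pattern : String) (out : Int) : Prop := out = count_overlap_cells_alt grid pattern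
instance (grid : List (List String)) (pattern : String) (out : Int) : Decidable (Spec_count_overlap_cells grid pattern out) := by unfold Spec_count_overlap_cells; infer_instance

-- ===== CLAIM (what is proved, stated in full; the proofs are below) =====
def Claim_equal_count_overlap_cells : Prop := ∀ (grid : List (List String)) (pattern : String), Dom_count_overlap_cells grid pattern → Pre_count_overlap_cells grid pattern → Spec_count_overlap_cells grid pattern (count_overlap_cells grid pattern)

-- ===== LEMMAS AND PROOFS =====

-- Reference prefix-hash list (proof-side only).
def phL (base md : Int) : List Char → Int → Int → List Int
  | [], h, _ => [h]
  | c :: t, h, pw =>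
      h :: phL base md t (PySem.Int.mod (h + ((c.toNat : Int) - 96) * pw) md)
                         (PySem.Int.mod (pw * base) md)

-- Reference scalar state after hashing a whole string (hash, power).
def hpw (base md : Int) : List Char → Int → Int → Int × Int
  | [], h, pw => (h, pw)
  | c :: t, h, pw =>
      hpw base md t (PySem.Int.mod (h + ((c.toNat : Int) - 96) * pw) md)
                    (PySem.Int.mod (pw * base) md)

theorem phL_ne_nil (base md : Int) (cs : List Char) (h pw : Int) : phL base md cs h pw ≠ [] := by
  cases cs <;> simp [phL]

theorem phL_length (base md : Int) (cs : List Char) : ∀ h pw, (phL base md cs h pw).length = cs.length + 1 := by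
  induction cs with
  | nil => simp [phL]
  | cons c t ih => intro h pw; simp [phL, ih]

theorem phL_append_singleton (base md : Int) (cs : List Char) (c : Char) : ∀ h pw,
    phL base md (cs ++ [c]) h pw =
      phL base md cs h pw ++
        [PySem.Int.mod ((hpw base md cs h pw).1 + ((c.toNat : Int) - 96) * (hpw base md cs h pw).2) md] := by
  induction cs with
  | nil => intro h pw; simp [phL, hpw]
  | cons d t ih => intro h pw; simp [phL, hpw, ih]

theorem hpw_append_singleton (base md : Int) (cs : List Char) (c : Char) : ∀ h pw,
    hpw base md (cs ++ [c]) h pw =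
      (PySem.Int.mod ((hpw base md cs h pw).1 + ((c.toNat : Int) - 96) * (hpw base md cs h pw).2) md,
       PySem.Int.mod ((hpw base md cs h pw).2 * base) md) := by
  induction cs with
  | nil => intro h pw; simp [hpw]
  | cons d t ih => intro h pw; simp [hpw, ih]

theorem phL_getLastD (base md : Int) (cs : List Char) : ∀ h pw d,
    (phL base md cs h pw).getLastD d = (hpw base md cs h pw).1 := by
  induction cs with
  | nil => simp [phL, hpw]
  | cons c t ih =>
      intro h pw d
      simp only [phL, hpw, List.getLastD_cons]
      exact ih _ _ _

theorem getD_last_of_length {l : List Int} {k : Nat} (hl : l.length = k + 1) (d : Int) :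
    l.getD k d = l.getLastD d := by
  rw [List.getD_eq_getElem?_getD, List.getLastD_eq_getLast?, List.getLast?_eq_getElem?, hl]
  simp

theorem rollA_aux (base md : Int) (cs : List Char) : ∀ (k : Nat), k ≤ cs.length →
    ((PySem.List.pyRange 0 (k : Int)).foldl
      (fun (st : List Int × Int) i =>
        (PySem.List.pySetD st.1 (i + 1)
          (PySem.Int.mod (PySem.List.pyGetD st.1 i 0 +
            (((PySem.List.pyGetD cs i ' ').toNat : Int) - 97 + 1) * st.2) md),
         PySem.Int.mod (st.2 * base) md))
      (List.replicate (cs.length + 1) (0 : Int), 1))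
    = (phL base md (cs.take k) 0 1 ++ List.replicate (cs.length - k) (0 : Int),
       (hpw base md (cs.take k) 0 1).2) := by
  intro k
  induction k with
  | zero =>
      intro _
      simp [PySem.List.pyRange_one_eq_nil, phL, hpw, List.replicate_succ]
  | succ k ih =>
      intro hk1
      have hk : k < cs.length := by omega
      have hrange : PySem.List.pyRange 0 ((k : Int) + 1) =
          PySem.List.pyRange 0 (k : Int) ++ [(k : Int)] :=
        PySem.List.pyRange_one_succ_right (by positivity)
      have hcast : ((k + 1 : Nat) : Int) = (k : Int) + 1 := by push_cast; ring
      rw [hcast, hrange, List.foldl_append, ih (by omega)]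
      simp only [List.foldl_cons, List.foldl_nil]
      set phl := phL base md (cs.take k) 0 1 with hphl
      have hlen : phl.length = k + 1 := by
        rw [hphl, phL_length]; simp [List.length_take, Nat.min_eq_left (le_of_lt hk)]
      have htake : cs.take (k + 1) = cs.take k ++ [cs[k]] := by
        rw [List.take_add_one]; simp [List.getElem?_eq_getElem hk]
      -- the read: position k is the last filled entry
      have hread : PySem.List.pyGetD (phl ++ List.replicate (cs.length - k) (0 : Int)) (k : Int) 0
          = (hpw base md (cs.take k) 0 1).1 := by
        rw [PySem.List.pyGetD_natCast, List.getD_append _ _ _ _ (by omega),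
            getD_last_of_length hlen, hphl, phL_getLastD]
      -- the char read
      have hchar : PySem.List.pyGetD cs (k : Int) ' ' = cs[k] := by
        rw [PySem.List.pyGetD_natCast, List.getD_eq_getElem _ _ (by omega)]
      -- the write: position k+1 is the first blank entry
      have hwrite : PySem.List.pySetD (phl ++ List.replicate (cs.length - k) (0 : Int))
            ((k : Int) + 1)
            (PySem.Int.mod ((hpw base md (cs.take k) 0 1).1 +
              (((cs[k].toNat : Int)) - 97 + 1) * (hpw base md (cs.take k) 0 1).2) md)
          = phL base md (cs.take (k + 1)) 0 1 ++ List.replicate (cs.length - (k + 1)) (0 : Int) := by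
        rw [← hcast, PySem.List.pySetD_natCast, List.set_append]
        have hrep : List.replicate (cs.length - k) (0 : Int)
            = 0 :: List.replicate (cs.length - (k + 1)) (0 : Int) := by
          rw [← List.replicate_succ]; congr 1; omega
        rw [if_neg (by omega), hrep]
        simp only [hlen, Nat.sub_self, List.set_cons_zero]
        rw [htake, phL_append_singleton]
        have harith : ((cs[k].toNat : Int) - 97 + 1) = ((cs[k].toNat : Int) - 96) := by ring
        simp [harith, hphl]
      simp only [hread, hchar, hwrite]
      rw [htake, hpw_append_singleton]

-- A's array-filling loop builds the reference prefix-hash list.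
theorem rollA (s : String) (base md : Int) :
    compute_rolling_hash s base md = phL base md s.toList 0 1 := by
  unfold compute_rolling_hash
  rw [PySem.Str.len_eq, rollA_aux base md s.toList s.toList.length le_rfl]
  simp only [List.take_length, Nat.sub_self, List.replicate_zero, List.append_nil]

theorem rollB_aux (base md : Int) (cs : List Char) : ∀ (acc : List Int) (h pw : Int),
    (cs.foldl
      (fun (st : List Int × Int) c =>
        (st.1 ++ [PySem.Int.mod (PySem.List.pyGetD st.1 (-1) 0 + (((c.toNat : Int)) - 96) * st.2) md],
         PySem.Int.mod (st.2 * base) md)) (acc ++ [h], pw)).1 = acc ++ phL base md cs h pw := by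
  induction cs with
  | nil => intro acc h pw; simp [phL]
  | cons c t ih =>
      intro acc h pw
      simp only [List.foldl_cons, PySem.List.pyGetD_neg_one_append_singleton]
      have := ih (acc ++ [h])
        (PySem.Int.mod (h + ((c.toNat : Int) - 96) * pw) md) (PySem.Int.mod (pw * base) md)
      simp only [List.append_assoc] at this ⊢
      rw [this]
      simp [phL]

-- B's append loop builds the reference prefix-hash list.
theorem rollB (base md : Int) (cs : List Char) :
    (cs.foldl
      (fun (st : List Int × Int) c =>
        (st.1 ++ [PySem.Int.mod (PySem.List.pyGetD st.1 (-1) 0 + (((c.toNat : Int)) - 96) * st.2) md],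
         PySem.Int.mod (st.2 * base) md)) ([0], 1)).1 = phL base md cs 0 1 := by
  simpa using rollB_aux base md cs [] 0 1

-- B's scalar loop computes the last reference prefix hash.
theorem scalB (base md : Int) (cs : List Char) :
    (cs.foldl
      (fun (st : Int × Int) c =>
        (PySem.Int.mod (st.1 + (((c.toNat : Int)) - 96) * st.2) md,
         PySem.Int.mod (st.2 * base) md)) (0, 1)).1 = (hpw base md cs 0 1).1 := by
  suffices h : ∀ (h0 pw : Int), (cs.foldl
      (fun (st : Int × Int) c =>
        (PySem.Int.mod (st.1 + (((c.toNat : Int)) - 96) * st.2) md,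
         PySem.Int.mod (st.2 * base) md)) (h0, pw)).1 = (hpw base md cs h0 pw).1 from h 0 1
  induction cs with
  | nil => intro h0 pw; simp [hpw]
  | cons c t ih => intro h0 pw; simp only [List.foldl_cons, hpw]; exact ih _ _

theorem pyGetD_phL_neg_one (base md : Int) (cs : List Char) (h pw : Int) :
    PySem.List.pyGetD (phL base md cs h pw) (-1) 0 = (hpw base md cs h pw).1 := by
  rw [PySem.List.pyGetD_neg_one _ _ (phL_ne_nil base md cs h pw)]
  have h2 := phL_getLastD base md cs h pw 0
  rw [List.getLastD_eq_getLast?, List.getLast?_eq_some_getLast (phL_ne_nil base md cs h pw)] at h2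
  simpa using h2

-- The two match-finding helpers agree (for a positive modulus).
theorem helpers_eq (text pattern : String) (base md : Int) (hmd : 0 < md) :
    find_substring_starts text pattern base md = match_starts text pattern base md := by
  unfold find_substring_starts match_starts
  simp only [rollA, rollB, scalB, pyGetD_phL_neg_one]
  rw [PySem.List.foldl_append_if
    (fun i => PySem.Int.mod (PySem.List.pyGetD (phL base md text.toList 0 1) (i + PySem.Str.len pattern) 0 -
        PySem.List.pyGetD (phL base md text.toList 0 1) i 0 + md) md == (hpw base md pattern.toList 0 1).1)
    (fun i => i)]
  simp only [List.map_id', List.nil_append]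
  apply List.filter_congr
  intro i _
  have hmod : ∀ x : Int, PySem.Int.mod (x + md) md = PySem.Int.mod x md := by
    intro x
    rw [PySem.Int.mod_eq_emod_of_pos hmd, PySem.Int.mod_eq_emod_of_pos hmd]
    exact (Int.emod_eq_add_self_emod ..).symm
  rw [hmod]

-- generic: membership through a fold that only adds elements
theorem foldl_mem_iff {β γ : Type} (l : List β) (F : List γ → β → List γ) (P : β → γ → Prop)
    (hF : ∀ S b y, y ∈ F S b ↔ y ∈ S ∨ P b y) :
    ∀ S y, y ∈ l.foldl F S ↔ y ∈ S ∨ ∃ b ∈ l, P b y := by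
  induction l with
  | nil => simp
  | cons b t ih =>
      intro S y
      simp only [List.foldl_cons, ih, hF]
      constructor
      · rintro ((h | h) | ⟨b', hb', h⟩)
        · exact Or.inl h
        · exact Or.inr ⟨b, by simp, h⟩
        · exact Or.inr ⟨b', by simp [hb'], h⟩
      · rintro (h | ⟨b', hb', h⟩)
        · exact Or.inl (Or.inl h)
        · rcases List.mem_cons.mp hb' with rfl | hb'
          · exact Or.inl (Or.inr h)
          · exact Or.inr ⟨b', hb', h⟩

-- generic: a fold preserving Nodup
theorem foldl_nodup {β γ : Type} (l : List β) (F : List γ → β → List γ)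
    (hF : ∀ S b, S.Nodup → (F S b).Nodup) :
    ∀ S, S.Nodup → (l.foldl F S).Nodup := by
  induction l with
  | nil => intro S h; simpa using h
  | cons b t ih => intro S hS; exact ih _ (hF S b hS)

-- A's horizontal marking set, over abstract match lists.
def buildH (rs : List (List Int)) (L : Int) : PySem.Set (Int × Int) :=
  (PySem.List.enumerate rs 0).foldl (fun S p =>
    p.2.foldl (fun S start =>
      (PySem.List.pyRange start (start + L)).foldl
        (fun S j => PySem.Set.add S (p.1, j)) S) S) PySem.Set.empty

def buildV (cs : List (List Int)) (L : Int) : PySem.Set (Int × Int) :=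
  (PySem.List.enumerate cs 0).foldl (fun S p =>
    p.2.foldl (fun S start =>
      (PySem.List.pyRange start (start + L)).foldl
        (fun S i => PySem.Set.add S (i, p.1)) S) S) PySem.Set.empty

theorem mem_buildH (rs : List (List Int)) (L : Int) (y : Int × Int) :
    y ∈ buildH rs L ↔ ∃ (k : Nat) (hk : k < rs.length) (s : Int),
      s ∈ rs[k] ∧ y.1 = (k : Int) ∧ s ≤ y.2 ∧ y.2 < s + L := by
  have hF : ∀ (S : PySem.Set (Int × Int)) (p : Int × List Int) (y : Int × Int),
      y ∈ p.2.foldl (fun S start =>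
        (PySem.List.pyRange start (start + L)).foldl (fun S j => PySem.Set.add S (p.1, j)) S) S ↔
      y ∈ S ∨ ∃ s ∈ p.2, ∃ j ∈ PySem.List.pyRange s (s + L), y = (p.1, j) := by
    intro S p y
    exact foldl_mem_iff p.2 _ (fun start y => ∃ j ∈ PySem.List.pyRange start (start + L), y = (p.1, j))
      (fun S start y => PySem.Set.mem_foldl_add (PySem.List.pyRange start (start + L)) (fun j => (p.1, j)) S y) S y
  unfold buildH
  rw [foldl_mem_iff (PySem.List.enumerate rs 0) _ _ hF PySem.Set.empty y]
  simp only [PySem.Set.empty, List.not_mem_nil, false_or, PySem.List.mem_enumerate_iff,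
    PySem.List.mem_pyRange_one]
  constructor
  · rintro ⟨p, ⟨k, hk, rfl⟩, s, hs, j, ⟨h1, h2⟩, rfl⟩
    exact ⟨k, hk, s, by simpa using hs, by simp, by simpa using h1, by simpa using h2⟩
  · rintro ⟨k, hk, s, hs, hy1, h1, h2⟩
    exact ⟨((0 : Int) + (k : Int), rs[k]), ⟨k, hk, rfl⟩, s, hs, y.2, ⟨h1, h2⟩,
      by rw [Prod.ext_iff]; constructor; · simpa using hy1
         · rfl⟩

theorem mem_buildV (cs : List (List Int)) (L : Int) (y : Int × Int) :
    y ∈ buildV cs L ↔ ∃ (k : Nat) (hk : k < cs.length) (s : Int),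
      s ∈ cs[k] ∧ y.2 = (k : Int) ∧ s ≤ y.1 ∧ y.1 < s + L := by
  have hF : ∀ (S : PySem.Set (Int × Int)) (p : Int × List Int) (y : Int × Int),
      y ∈ p.2.foldl (fun S start =>
        (PySem.List.pyRange start (start + L)).foldl (fun S i => PySem.Set.add S (i, p.1)) S) S ↔
      y ∈ S ∨ ∃ s ∈ p.2, ∃ i ∈ PySem.List.pyRange s (s + L), y = (i, p.1) := by
    intro S p y
    exact foldl_mem_iff p.2 _ (fun start y => ∃ i ∈ PySem.List.pyRange start (start + L), y = (i, p.1))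
      (fun S start y => PySem.Set.mem_foldl_add (PySem.List.pyRange start (start + L)) (fun i => (i, p.1)) S y) S y
  unfold buildV
  rw [foldl_mem_iff (PySem.List.enumerate cs 0) _ _ hF PySem.Set.empty y]
  simp only [PySem.Set.empty, List.not_mem_nil, false_or, PySem.List.mem_enumerate_iff,
    PySem.List.mem_pyRange_one]
  constructor
  · rintro ⟨p, ⟨k, hk, rfl⟩, s, hs, i, ⟨h1, h2⟩, rfl⟩
    exact ⟨k, hk, s, by simpa using hs, by simp, by simpa using h1, by simpa using h2⟩
  · rintro ⟨k, hk, s, hs, hy2, h1, h2⟩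
    exact ⟨((0 : Int) + (k : Int), cs[k]), ⟨k, hk, rfl⟩, s, hs, y.1, ⟨h1, h2⟩,
      by rw [Prod.ext_iff]; constructor; · rfl
         · simpa using hy2⟩

theorem nodup_build_aux (ms : List (Int × List Int)) (L : Int)
    (g : Int × Int → Int → Int × Int) :
    ∀ (S : PySem.Set (Int × Int)), S.Nodup →
      (ms.foldl (fun S p =>
        p.2.foldl (fun S start =>
          (PySem.List.pyRange start (start + L)).foldl
            (fun S j => PySem.Set.add S (g (p.1, start) j)) S) S) S).Nodup := by
  apply foldl_nodup
  intro S p hS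
  refine foldl_nodup _ _ ?_ S hS
  intro S start hS
  refine foldl_nodup _ _ ?_ S hS
  intro S j hS
  exact PySem.Set.nodup_add _ _ hS

theorem nodup_buildH (rs : List (List Int)) (L : Int) : (buildH rs L).Nodup := by
  unfold buildH
  exact nodup_build_aux (PySem.List.enumerate rs 0) L (fun p j => (p.1, j)) PySem.Set.empty List.nodup_nil

-- B's cell test, over abstract match lists.
def qb (rs cs : List (List Int)) (L i j : Int) : Bool :=
  (PySem.List.pyGetD rs i []).any (fun s => decide (s ≤ j) && decide (j < s + L)) &&
  (PySem.List.pyGetD cs j []).any (fun s => decide (s ≤ i) && decide (i < s + L))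

-- Central counting identity: |H ∩ V| equals B's double loop count.
theorem count_eq (rs cs : List (List Int)) (L : Int) :
    PySem.Set.len (PySem.Set.inter (buildH rs L) (buildV cs L)) =
    (PySem.List.pyRange 0 (rs.length : Int)).foldl (fun total i =>
      (PySem.List.pyRange 0 (cs.length : Int)).foldl (fun total j =>
        if qb rs cs L i j then total + 1 else total) total) 0 := by
  -- B's double loop is the size of the explicit list of counted cells
  have hB : (PySem.List.pyRange 0 (rs.length : Int)).foldl (fun total i =>
      (PySem.List.pyRange 0 (cs.length : Int)).foldl (fun total j =>
        if qb rs cs L i j then total + 1 else total) total) 0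
      = (((PySem.List.pyRange 0 (rs.length : Int)).flatMap (fun i =>
          ((PySem.List.pyRange 0 (cs.length : Int)).filter (fun j => qb rs cs L i j)).map
            (fun j => (i, j)))).length : Int) := by
    simp only [PySem.List.foldl_count_if, PySem.List.foldl_add, List.length_flatMap,
      List.length_map, zero_add, ← List.countP_eq_length_filter]
    induction PySem.List.pyRange 0 (rs.length : Int) with
    | nil => simp
    | cons a t ih => simp [ih]
  rw [hB]
  -- the counted-cell list and H ∩ V have the same members, both without duplicates
  set E := (PySem.List.pyRange 0 (rs.length : Int)).flatMap (fun i =>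
      ((PySem.List.pyRange 0 (cs.length : Int)).filter (fun j => qb rs cs L i j)).map
        (fun j => (i, j))) with hE
  have hnodupE : E.Nodup := by
    rw [hE, List.nodup_flatMap]
    constructor
    · intro i _
      exact ((PySem.List.nodup_pyRange_one 0 (cs.length : Int)).filter _).map
        (fun a b hab => by simpa using hab)
    · refine (PySem.List.nodup_pyRange_one 0 (rs.length : Int)).pairwise_of_forall_ne ?_
      intro i₁ _ i₂ _ hne y h1 h2
      simp only [List.mem_map, List.mem_filter] at h1 h2
      obtain ⟨j₁, _, rfl⟩ := h1
      obtain ⟨j₂, _, hq⟩ := h2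
      exact hne (by simpa using congrArg Prod.fst hq.symm)
  have hmem : ∀ y : Int × Int, y ∈ PySem.Set.inter (buildH rs L) (buildV cs L) ↔ y ∈ E := by
    intro y
    rw [PySem.Set.mem_inter, mem_buildH, mem_buildV, hE]
    simp only [List.mem_flatMap, List.mem_map, List.mem_filter, PySem.List.mem_pyRange_one]
    constructor
    · rintro ⟨⟨k, hk, s, hs, hy1, h1, h2⟩, ⟨k', hk', s', hs', hy2, h1', h2'⟩⟩
      refine ⟨y.1, ⟨by omega, by omega⟩, y.2, ⟨⟨by omega, by omega⟩, ?_⟩, rfl⟩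
      unfold qb
      rw [Bool.and_eq_true, List.any_eq_true, List.any_eq_true]
      constructor
      · refine ⟨s, ?_, by simp [h1, h2]⟩
        rw [hy1, PySem.List.pyGetD_natCast, List.getD_eq_getElem _ _ hk]
        exact hs
      · refine ⟨s', ?_, by simp [h1', h2']⟩
        rw [hy2, PySem.List.pyGetD_natCast, List.getD_eq_getElem _ _ hk']
        exact hs'
    · rintro ⟨i, ⟨hi0, him⟩, j, ⟨⟨hj0, hjn⟩, hq⟩, rfl⟩
      unfold qb at hq
      rw [Bool.and_eq_true, List.any_eq_true, List.any_eq_true] at hq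
      obtain ⟨⟨s, hsmem, hsq⟩, ⟨s', hsmem', hsq'⟩⟩ := hq
      simp only [Bool.and_eq_true, decide_eq_true_eq] at hsq hsq'
      have hik : i = ((i.toNat : Nat) : Int) := by omega
      have hjk : j = ((j.toNat : Nat) : Int) := by omega
      have hkm : i.toNat < rs.length := by omega
      have hkn : j.toNat < cs.length := by omega
      rw [hik, PySem.List.pyGetD_natCast, List.getD_eq_getElem _ _ hkm] at hsmem
      rw [hjk, PySem.List.pyGetD_natCast, List.getD_eq_getElem _ _ hkn] at hsmem'
      exact ⟨⟨i.toNat, hkm, s, hsmem, by simpa using hik, hsq.1, hsq.2⟩,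
             ⟨j.toNat, hkn, s', hsmem', by simpa using hjk, hsq'.1, hsq'.2⟩⟩
  have hperm : (PySem.Set.inter (buildH rs L) (buildV cs L)).Perm E :=
    (List.perm_ext_iff_of_nodup
      (PySem.Set.nodup_inter _ _ (nodup_buildH rs L)) hnodupE).mpr hmem
  simp only [PySem.Set.len, hperm.length_eq]

-- ===== VERDICT (by name: the statement is the Claim_ definition above) =====
theorem count_overlap_cells_spec : Claim_equal_count_overlap_cells := by
  intro grid pattern _ _
  unfold Spec_count_overlap_cells count_overlap_cells count_overlap_cells_alt
  have hcols : ∀ j : Int,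
      (PySem.List.pyRange 0 (grid.length : Int)).map
        (fun i => PySem.List.pyGetD (PySem.List.pyGetD grid i []) j "")
      = grid.map (fun r => PySem.List.pyGetD r j "") := by
    intro j
    rw [show (fun i => PySem.List.pyGetD (PySem.List.pyGetD grid i []) j "")
        = (fun r => PySem.List.pyGetD r j "") ∘ (fun i => PySem.List.pyGetD grid i []) from rfl,
      ← List.map_map, PySem.List.map_pyGetD_pyRange_zero']
  simp only [helpers_eq _ _ 257 (10 ^ 9 + 7 : Int) (by norm_num), hcols]
  have hmain := count_eq
    ((grid.map (fun row => PySem.Str.join "" row)).map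
      (fun row => match_starts row pattern 257 (10 ^ 9 + 7)))
    (((PySem.List.pyRange 0 ((PySem.List.pyGetD grid 0 []).length : Int)).map
        (fun j => PySem.Str.join "" (grid.map (fun r => PySem.List.pyGetD r j "")))).map
      (fun col => match_starts col pattern 257 (10 ^ 9 + 7)))
    (PySem.Str.len pattern)
  simp only [List.length_map, PySem.List.length_pyRange_one, Int.sub_zero,
    Int.toNat_natCast] at hmain
  unfold buildH buildV qb at hmain
  exact hmain
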